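-- pv_equiv track=rewrite | github.com/ILNEKELASHENGINEER/Placement_Problems | bob&pendulum.py | finddis
-- ===== SOURCE A (Python) =====
-- def finddis(n,distancearr):
--     distancearr.sort()
--     res=[0]*n
--     midindex = n//2
--     left = midindex-1
--     right = midindex+1
--     res[midindex] = distancearr[0]
--     ifleft = True
--
--     for i in range(1,n):
--         if ifleft:
--             res[left] = distancearr[i]
--             left-=1
--         else:
--             res[right] = distancearr[i]
--             right+=1
--         ifleft = not ifleft
--     return res
-- ===== SOURCE B (Python) =====
-- def finddis(n, distancearr):
--     distancearr.sort()
--     left, right = [], []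
--     for i in range(n):
--         if i % 2:
--             left.append(distancearr[i])
--         else:
--             right.append(distancearr[i])
--     left.reverse()
--     return left + right
-- ===== Notes on version B (the rewrite author's own statement) =====
-- stated objective: alternative
-- what changed: Instead of preallocating [0]*n and writing into it through stateful left/right/ifleft pointers, B appends each sorted element to one of two growing lists (odd positions of the sorted order to 'left', even to 'right') and returns reversed(left) + right, so no index arithmetic or in-place writes remain.
-- crash fix: For n <= 0 A raises IndexError (it assigns res[n//2] on an empty/short res), while B's empty loop naturally returns []. — e.g. on finddis(0, []): A raises IndexError, B returns []
import Mathlib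
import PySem

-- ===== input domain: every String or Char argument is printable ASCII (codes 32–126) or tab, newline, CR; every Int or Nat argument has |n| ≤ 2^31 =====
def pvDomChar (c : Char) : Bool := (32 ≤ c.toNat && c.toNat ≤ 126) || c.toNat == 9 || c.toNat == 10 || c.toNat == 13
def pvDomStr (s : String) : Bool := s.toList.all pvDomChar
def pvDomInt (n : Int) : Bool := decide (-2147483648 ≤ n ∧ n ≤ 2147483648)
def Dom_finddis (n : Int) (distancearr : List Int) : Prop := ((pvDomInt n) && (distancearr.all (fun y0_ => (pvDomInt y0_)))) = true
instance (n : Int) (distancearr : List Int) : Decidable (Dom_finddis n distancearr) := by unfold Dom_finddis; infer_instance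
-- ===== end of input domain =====

-- B drops A's preallocated [0]*n array and its left/right/ifleft pointer state: it appends
-- each sorted element to one of two growing lists and returns reversed(left) + right
-- (objective: alternative decomposition). Equivalence is about the RETURN value; both
-- Pythons sort distancearr in place identically.

-- ===== PORT A =====
-- A's loop body: state (res, left, right, ifleft); branch order as in the Python.
def finddisStep (d : List Int) (st : List Int × Int × Int × Bool) (i : Int) :
    List Int × Int × Int × Bool :=
  let res := st.1; let left := st.2.1; let right := st.2.2.1; let ifleft := st.2.2.2
  if ifleft then
    (PySem.List.pySetD res left (PySem.List.pyGetD d i 0), left - 1, right, !ifleft)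
  else
    (PySem.List.pySetD res right (PySem.List.pyGetD d i 0), left, right + 1, !ifleft)

def finddis (n : Int) (distancearr : List Int) : List Int :=
  let d := PySem.List.sorted distancearr (fun x => x) false
  let res := List.replicate n.toNat 0           -- [0]*n (empty for n ≤ 0, as in Python)
  let midindex := PySem.Int.floordiv n 2
  let left := midindex - 1
  let right := midindex + 1
  let res := PySem.List.pySetD res midindex (PySem.List.pyGetD d 0 0)
  let ifleft := true
  let st := (PySem.List.pyRange 1 n 1).foldl (finddisStep d) (res, left, right, ifleft)
  st.1

-- ===== PORT B =====
-- B's loop body: append d[i] to 'left' when i is odd, to 'right' when i is even.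
def finddisAltStep (d : List Int) (st : List Int × List Int) (i : Int) :
    List Int × List Int :=
  if PySem.Int.mod i 2 ≠ 0 then (st.1 ++ [PySem.List.pyGetD d i 0], st.2)
  else (st.1, st.2 ++ [PySem.List.pyGetD d i 0])

def finddis_alt (n : Int) (distancearr : List Int) : List Int :=
  let d := PySem.List.sorted distancearr (fun x => x) false
  let st := (PySem.List.pyRange 0 n 1).foldl (finddisAltStep d) ([], [])
  st.1.reverse ++ st.2

-- ===== PRECONDITION & SPEC =====
-- Pre_ excludes exactly the inputs where the Python A raises IndexError:
-- n ≤ 0 (res is empty but res[midindex] is assigned) or len(distancearr) < n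
-- (distancearr[i] out of range).
def Pre_finddis (n : Int) (distancearr : List Int) : Prop :=
  1 ≤ n ∧ n ≤ (distancearr.length : Int)
instance (n : Int) (distancearr : List Int) : Decidable (Pre_finddis n distancearr) := by
  unfold Pre_finddis; infer_instance

def pvWitness_finddis : Int × List Int := (4, [7, 1, 5, 2])

-- For n <= 0 A raises IndexError (it assigns res[n//2] on an empty/short res), while B's empty loop naturally returns [].
def Raises_finddis (n : Int) (distancearr : List Int) : Prop := n ≤ 0
instance (n : Int) (distancearr : List Int) : Decidable (Raises_finddis n distancearr) := by
  unfold Raises_finddis; infer_instance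
def pvRaiseWitness_finddis : Int × List Int := (0, [])
def pvRaiseWitnessOut_finddis : List Int := []

def Spec_finddis (n : Int) (distancearr : List Int) (out : List Int) : Prop :=
  out = finddis_alt n distancearr
instance (n : Int) (distancearr : List Int) (out : List Int) : Decidable (Spec_finddis n distancearr out) := by
  unfold Spec_finddis; infer_instance

-- ===== CLAIM (what is proved, stated in full; the proofs are below) =====
def Claim_equal_finddis : Prop := ∀ (n : Int) (distancearr : List Int), Dom_finddis n distancearr → Pre_finddis n distancearr → Spec_finddis n distancearr (finddis n distancearr)

def Claim_raises_finddis : Prop := (∀ (n : Int) (distancearr : List Int), Dom_finddis n distancearr → Raises_finddis n distancearr → ¬ Pre_finddis n distancearr) ∧ (Dom_finddis (pvRaiseWitness_finddis.1) (pvRaiseWitness_finddis.2) ∧ Raises_finddis (pvRaiseWitness_finddis.1) (pvRaiseWitness_finddis.2) ∧ finddis_alt (pvRaiseWitness_finddis.1) (pvRaiseWitness_finddis.2) = pvRaiseWitnessOut_finddis)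

-- ===== LEMMAS AND PROOFS =====

-- Setting the element between 'pre' and 'post' (at index pre.length).
lemma set_at_join (pre post : List Int) (x v : Int) :
    (pre ++ x :: post).set pre.length v = pre ++ v :: post := by
  rw [List.set_eq_take_append_cons_drop]
  simp

-- Splitting a zero block at position j.
lemma repl_split (j m : Nat) (h : j < m) :
    List.replicate m (0:Int) = List.replicate j 0 ++ (0:Int) :: List.replicate (m - j - 1) 0 := by
  rw [show m = j + (1 + (m - j - 1)) by omega, List.replicate_add, List.replicate_add]
  simp

-- Writing at the last cell of the leading zero block.
lemma set_in_left (a : Nat) (xs : List Int) (v : Int) (h : 0 < a) :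
    (List.replicate a (0:Int) ++ xs).set (a - 1) v = List.replicate (a - 1) 0 ++ v :: xs := by
  rw [repl_split (a-1) a (by omega)]
  have h2 := set_at_join (List.replicate (a-1) (0:Int)) (List.replicate (a-(a-1)-1) 0 ++ xs) 0 v
  simp only [List.length_replicate] at h2
  simp only [show a - (a-1) - 1 = 0 by omega, List.replicate_zero, List.nil_append] at h2 ⊢
  simpa using h2

-- Writing at the first cell of the trailing zero block.
lemma set_in_right (pre : List Int) (b : Nat) (v : Int) (h : 0 < b) :
    (pre ++ List.replicate b (0:Int)).set pre.length v = pre ++ v :: List.replicate (b - 1) 0 := by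
  rw [repl_split 0 b h]
  simpa using set_at_join pre (List.replicate (b - 0 - 1) 0) 0 v

-- The initial res[mid] = d[0] assignment in zero-block form.
lemma init_res (m : Nat) (hm : 0 < m) (v : Int) :
    PySem.List.pySetD (List.replicate m (0:Int)) ((m/2 : Nat) : Int) v
      = List.replicate (m/2) 0 ++ v :: List.replicate (m - m/2 - 1) 0 := by
  rw [PySem.List.pySetD_natCast]
  rw [repl_split (m/2) m (by omega)]
  simpa using set_at_join (List.replicate (m/2) (0:Int)) (List.replicate (m - m/2 - 1) 0) 0 v

-- Loop invariant: after A has processed i = 1..k and B has processed i = 0..k,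
-- A's res is B's two accumulators laid out around the middle between zero blocks,
-- A's pointers and flag are determined by the accumulated lengths, and those
-- lengths are (k+1)/2 and k/2 + 1.
lemma finddis_loop_inv (t : List Int) (m : Nat) :
    ∀ k : Nat, k < m →
      ((PySem.List.pyRange 0 (1 + (k:Int)) 1).foldl (finddisAltStep t) ([], [])).1.length = (k+1)/2
      ∧ ((PySem.List.pyRange 0 (1 + (k:Int)) 1).foldl (finddisAltStep t) ([], [])).2.length = k/2 + 1
      ∧ (PySem.List.pyRange 1 (1 + (k:Int)) 1).foldl (finddisStep t)
          (PySem.List.pySetD (List.replicate m 0) ((m/2 : Nat) : Int) (PySem.List.pyGetD t 0 0),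
           ((m/2 : Nat) : Int) - 1, ((m/2 : Nat) : Int) + 1, true)
        = (List.replicate (m/2 - (k+1)/2) 0
            ++ ((PySem.List.pyRange 0 (1 + (k:Int)) 1).foldl (finddisAltStep t) ([], [])).1.reverse
            ++ ((PySem.List.pyRange 0 (1 + (k:Int)) 1).foldl (finddisAltStep t) ([], [])).2
            ++ List.replicate (m - m/2 - (k/2 + 1)) 0,
           ((m/2 : Nat) : Int) - 1 - (((k+1)/2 : Nat) : Int),
           ((m/2 : Nat) : Int) + ((k/2 + 1 : Nat) : Int),
           decide (k % 2 = 0)) := by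
  intro k
  induction k with
  | zero =>
      intro hm
      rw [show (1 : Int) + ((0 : Nat) : Int) = 1 by norm_num]
      rw [PySem.List.pyRange_one_cons (a := 0) (by omega)]
      rw [show (0 : Int) + 1 = 1 by norm_num]
      rw [PySem.List.pyRange_one_eq_nil (le_refl (1:Int))]
      simp only [List.foldl_cons, List.foldl_nil, finddisAltStep]
      rw [if_neg (by simp [PySem.Int.mod])]
      refine ⟨by simp, by simp, ?_⟩
      rw [init_res m hm (PySem.List.pyGetD t 0 0)]
      simp
  | succ j ih =>
      intro hjm
      obtain ⟨hL, hR, hA⟩ := ih (by omega)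
      have hsplitB : PySem.List.pyRange 0 (1 + ((j+1 : Nat) : Int)) 1
          = PySem.List.pyRange 0 (1 + (j : Int)) 1 ++ [1 + (j : Int)] := by
        rw [show (1 : Int) + ((j + 1 : Nat) : Int) = (1 + (j : Int)) + 1 by push_cast; ring,
            PySem.List.pyRange_one_succ_right (by omega)]
      have hsplitA : PySem.List.pyRange 1 (1 + ((j+1 : Nat) : Int)) 1
          = PySem.List.pyRange 1 (1 + (j : Int)) 1 ++ [1 + (j : Int)] := by
        rw [show (1 : Int) + ((j + 1 : Nat) : Int) = (1 + (j : Int)) + 1 by push_cast; ring,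
            PySem.List.pyRange_one_succ_right (by omega)]
      rw [hsplitB, hsplitA, List.foldl_append, List.foldl_append, hA]
      set p := (PySem.List.pyRange 0 (1 + (j : Int)) 1).foldl (finddisAltStep t) ([], []) with hp
      simp only [List.foldl_cons, List.foldl_nil, finddisStep, finddisAltStep,
        PySem.Int.mod_eq_emod_of_pos (show (0:Int) < 2 by norm_num)]
      rcases Nat.even_or_odd j with hj | hj
      · -- j even: A's flag is true (writes left); i = 1+j is odd, B appends to left
        obtain ⟨c, hc⟩ := hj
        rw [if_pos (show decide (j % 2 = 0) = true by simp; omega),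
            if_pos (show ¬ (1 + (j : Int)) % 2 = 0 by omega)]
        refine ⟨?_, ?_, ?_⟩
        · simp
          omega
        · simp
          omega
        · simp only [Prod.mk.injEq]
          refine ⟨?_, by push_cast; omega, by push_cast; omega,
            by rw [show j % 2 = 0 by omega, show (j+1) % 2 = 1 by omega]; decide⟩
          rw [PySem.List.pySetD_of_nonneg _ _ (by push_cast; omega)]
          rw [show (((m/2 : Nat) : Int) - 1 - (((j+1)/2 : Nat) : Int)).toNat
                = (m/2 - (j+1)/2) - 1 by omega]
          rw [List.append_assoc, List.append_assoc]
          rw [set_in_left (m/2 - (j+1)/2) _ (PySem.List.pyGetD t (1 + (j:Int)) 0) (by omega)]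
          simp only [List.reverse_append, List.reverse_singleton, List.append_assoc, List.cons_append]
          rw [show m/2 - (j+1+1)/2 = m/2 - (j+1)/2 - 1 by omega,
              show m - m/2 - ((j+1)/2 + 1) = m - m/2 - (j/2 + 1) by omega]
          simp
      · -- j odd: A's flag is false (writes right); i = 1+j is even, B appends to right
        obtain ⟨c, hc⟩ := hj
        rw [if_neg (show ¬ decide (j % 2 = 0) = true by simp; omega),
            if_neg (show ¬ ¬ (1 + (j : Int)) % 2 = 0 by omega)]
        have hpad : 0 < m - m/2 - (j/2 + 1) := by omega
        refine ⟨?_, ?_, ?_⟩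
        · simp
          omega
        · simp
          omega
        · simp only [Prod.mk.injEq]
          refine ⟨?_, by push_cast; omega, by push_cast; omega,
            by rw [show j % 2 = 1 by omega, show (j+1) % 2 = 0 by omega]; decide⟩
          rw [PySem.List.pySetD_of_nonneg _ _ (by push_cast; omega)]
          have hlen : (((m/2 : Nat) : Int) + ((j/2 + 1 : Nat) : Int)).toNat
              = (List.replicate (m/2 - (j+1)/2) (0:Int) ++ p.1.reverse ++ p.2).length := by
            simp only [List.length_append, List.length_reverse, List.length_replicate]
            omega
          rw [hlen, set_in_right _ _ _ hpad]
          simp only [List.append_assoc, List.cons_append]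
          rw [show m/2 - (j+1+1)/2 = m/2 - (j+1)/2 by omega,
              show m - m/2 - ((j+1)/2 + 1) = m - m/2 - (j/2 + 1) - 1 by omega]
          simp

-- ===== VERDICT (by name: the statement is the Claim_ definition above) =====
theorem finddis_spec : Claim_equal_finddis := by
  intro n distancearr _hdom hpre
  obtain ⟨h1, _h2⟩ := hpre
  unfold Spec_finddis finddis finddis_alt
  simp only []
  set t := PySem.List.sorted distancearr (fun x => x) false with ht
  have hm : n = ((n.toNat : Nat) : Int) := by omega
  set m := n.toNat with hmdef
  have hmid : PySem.Int.floordiv n 2 = ((m/2 : Nat) : Int) := by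
    rw [hm]; exact_mod_cast PySem.Int.floordiv_natCast m 2
  have hk : n = 1 + ((m - 1 : Nat) : Int) := by omega
  have hinv := finddis_loop_inv t m (m - 1) (by omega)
  obtain ⟨hL, hR, hA⟩ := hinv
  rw [hmid, hm]
  rw [show ((m : Nat) : Int) = 1 + ((m - 1 : Nat) : Int) by omega] at *
  rw [hA]
  have e1 : m/2 - ((m-1)+1)/2 = 0 := by omega
  have e2 : m - m/2 - ((m-1)/2 + 1) = 0 := by omega
  simp [e1, e2]

theorem finddis_raises : Claim_raises_finddis := by
  unfold Claim_raises_finddis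
  constructor
  · intro n distancearr _ hr hpre
    exact absurd hpre.1 (by unfold Raises_finddis at hr; omega)
  · exact ⟨by decide, by decide, by decide⟩

-- self-check: the literal in pvRaiseWitnessOut_finddis is exactly the value finddis_raises proves B returns there
theorem pvRaiseWitness_ok :
    finddis_alt pvRaiseWitness_finddis.1 pvRaiseWitness_finddis.2 = pvRaiseWitnessOut_finddis :=
  finddis_raises.2.2.2
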